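-- pv_equiv track=rewrite | github.com/git25math/25maths-examhub | scripts/convert-tables.py | split_cells
-- ===== SOURCE A (Python) =====
-- def split_cells(row_text):
--     """Split row by & respecting braces and math mode."""
--     cells = []
--     depth = 0
--     current = []
--     for ch in row_text:
--         if ch == '{':
--             depth += 1
--             current.append(ch)
--         elif ch == '}':
--             depth -= 1
--             current.append(ch)
--         elif ch == '&' and depth == 0:
--             cells.append(''.join(current))
--             current = []
--         else:
--             current.append(ch)
--     cells.append(''.join(current))
--     return [c.strip() for c in cells]
-- ===== SOURCE B (Python) =====
-- def _find_top_amp(row_text):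
--     """Index of the first '&' at brace depth 0, or None."""
--     depth = 0
--     for i, ch in enumerate(row_text):
--         if ch == '{':
--             depth += 1
--         elif ch == '}':
--             depth -= 1
--         elif ch == '&' and depth == 0:
--             return i
--     return None
--
--
-- def split_cells(row_text):
--     """Split row by & respecting braces and math mode."""
--     cells = []
--     rest = row_text
--     while True:
--         j = _find_top_amp(rest)
--         if j is None:
--             cells.append(rest.strip())
--             return cells
--         cells.append(rest[:j].strip())
--         rest = rest[j + 1:]
-- ===== Notes on version B (the rewrite author's own statement) =====
-- stated objective: alternative
-- what changed: replaces the single fold that maintains a character buffer and a list of joined cells with a find-then-slice decomposition: a helper locates the next depth-0 '&' index, the cell is cut out of the string by slicing, and the loop repeats on the remaining suffix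
import Mathlib
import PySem

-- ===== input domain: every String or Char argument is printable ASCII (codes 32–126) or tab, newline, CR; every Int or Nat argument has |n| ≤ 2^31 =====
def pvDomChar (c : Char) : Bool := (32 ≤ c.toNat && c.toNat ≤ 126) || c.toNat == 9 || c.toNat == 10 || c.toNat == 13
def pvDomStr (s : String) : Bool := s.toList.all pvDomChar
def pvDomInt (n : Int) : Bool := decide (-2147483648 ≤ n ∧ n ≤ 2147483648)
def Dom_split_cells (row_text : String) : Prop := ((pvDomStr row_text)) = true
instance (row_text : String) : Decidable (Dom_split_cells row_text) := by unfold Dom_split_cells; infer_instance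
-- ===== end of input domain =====

-- B replaces A's buffer-and-join fold with a find-then-slice loop (locate next depth-0 '&', cut, recurse on the suffix); alternative decomposition, same cost.

-- ===== PORT A =====
-- the for-loop over row_text with state (depth, current, pending cells); cells are
-- produced in order, so the loop is the structural recursion emitting finished cells in front
def splitA : List Char → Int → List Char → List String
  | [], _depth, current => [String.mk current]
  | ch :: rest, depth, current =>
    if ch = '{' then splitA rest (depth + 1) (current ++ [ch])
    else if ch = '}' then splitA rest (depth - 1) (current ++ [ch])
    else if ch = '&' ∧ depth = 0 then String.mk current :: splitA rest depth []
    else splitA rest depth (current ++ [ch])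

def split_cells (row_text : String) : List String :=
  (splitA row_text.toList 0 []).map PySem.Str.strip

-- ===== PORT B =====
-- _find_top_amp: index of the first '&' at brace depth 0, or None
def findTopAmp : List Char → Int → Option Nat
  | [], _depth => none
  | ch :: rest, depth =>
    if ch = '{' then (findTopAmp rest (depth + 1)).map (· + 1)
    else if ch = '}' then (findTopAmp rest (depth - 1)).map (· + 1)
    else if ch = '&' ∧ depth = 0 then some 0
    else (findTopAmp rest depth).map (· + 1)

-- needed by splitAuxB's termination: a found index is inside the list
lemma findTopAmp_lt : ∀ (cs : List Char) (d : Int) (j : Nat),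
    findTopAmp cs d = some j → j < cs.length := by
  intro cs
  induction cs with
  | nil => intro d j h; simp [findTopAmp] at h
  | cons ch rest ih =>
    intro d j h
    simp only [findTopAmp] at h
    split_ifs at h with h1 h2 h3
    · rcases Option.map_eq_some_iff.mp h with ⟨a, ha, rfl⟩
      have := ih _ _ ha; simp; omega
    · rcases Option.map_eq_some_iff.mp h with ⟨a, ha, rfl⟩
      have := ih _ _ ha; simp; omega
    · cases h; simp
    · rcases Option.map_eq_some_iff.mp h with ⟨a, ha, rfl⟩
      have := ih _ _ ha; simp; omega

-- the while-loop of B: cut at the next depth-0 '&', strip the slice, continue on the suffix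
def splitAuxB (cs : List Char) : List String :=
  match h : findTopAmp cs 0 with
  | none => [PySem.Str.strip (String.mk cs)]
  | some j => PySem.Str.strip (String.mk (cs.take j)) :: splitAuxB (cs.drop (j + 1))
termination_by cs.length
decreasing_by
  have := findTopAmp_lt cs 0 j h
  simp [List.length_drop]; omega

def split_cells_alt (row_text : String) : List String :=
  splitAuxB row_text.toList

-- ===== PRECONDITION & SPEC =====
def Spec_split_cells (row_text : String) (out : List String) : Prop := out = split_cells_alt row_text
instance (row_text : String) (out : List String) : Decidable (Spec_split_cells row_text out) := by unfold Spec_split_cells; infer_instance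

-- ===== CLAIM (what is proved, stated in full; the proofs are below) =====
def Claim_equal_split_cells : Prop := ∀ (row_text : String), Dom_split_cells row_text → Spec_split_cells row_text (split_cells row_text)

-- ===== LEMMAS AND PROOFS =====

-- A's loop, characterised by the position of the next depth-0 '&'
lemma splitA_eq : ∀ (cs : List Char) (cur : List Char) (d : Int),
    splitA cs d cur =
      match findTopAmp cs d with
      | none => [String.mk (cur ++ cs)]
      | some j => String.mk (cur ++ cs.take j) :: splitA (cs.drop (j + 1)) 0 [] := by
  intro cs
  induction cs with
  | nil => intro cur d; simp [splitA, findTopAmp]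
  | cons ch rest ih =>
    intro cur d
    by_cases h1 : ch = '{'
    · simp only [splitA, findTopAmp, if_pos h1]
      rw [ih (cur ++ [ch]) (d + 1)]
      cases e : findTopAmp rest (d + 1) with
      | none => simp [e, h1]
      | some j => simp [e, h1, List.take_succ_cons, List.drop_succ_cons]
    · by_cases h2 : ch = '}'
      · simp only [splitA, findTopAmp, if_neg h1, if_pos h2]
        rw [ih (cur ++ [ch]) (d - 1)]
        cases e : findTopAmp rest (d - 1) with
        | none => simp [e, h2]
        | some j => simp [e, h2, List.take_succ_cons, List.drop_succ_cons]
      · by_cases h3 : ch = '&' ∧ d = 0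
        · simp only [splitA, findTopAmp, if_neg h1, if_neg h2, if_pos h3]
          simp [h3.2]
        · simp only [splitA, findTopAmp, if_neg h1, if_neg h2, if_neg h3]
          rw [ih (cur ++ [ch]) d]
          cases e : findTopAmp rest d with
          | none => simp [e]
          | some j => simp [e, List.take_succ_cons, List.drop_succ_cons]

lemma main_eq : ∀ (cs : List Char), (splitA cs 0 []).map PySem.Str.strip = splitAuxB cs := by
  intro cs
  induction hn : cs.length using Nat.strong_induction_on generalizing cs with
  | _ n ihn =>
    rw [splitA_eq cs [] 0, splitAuxB]
    cases e : findTopAmp cs 0 with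
    | none => simp
    | some j =>
      have hj := findTopAmp_lt cs 0 j e
      simp only [List.nil_append, List.map_cons]
      rw [ihn (cs.drop (j + 1)).length (by simp [List.length_drop]; omega) _ rfl]

-- ===== VERDICT (by name: the statement is the Claim_ definition above) =====
theorem split_cells_spec : Claim_equal_split_cells := by
  intro s _
  unfold Spec_split_cells split_cells split_cells_alt
  exact main_eq s.toList
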